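-- pv_equiv track=rewrite | github.com/jawsec/vigil | vigil/vigil/monitors/file_integrity.py | _check_changes
-- ===== SOURCE A (Python) =====
-- def _check_changes(baseline: dict[str, str], current: dict[str, str]) -> tuple[list, list, list]:
--     """Compare current scan against baseline.
--
--     Returns:
--         Tuple of (new_files, removed_files, modified_files).
--     """
--     baseline_paths = set(baseline.keys())
--     current_paths = set(current.keys())
--
--     new_files = sorted(current_paths - baseline_paths)
--     removed_files = sorted(baseline_paths - current_paths)
--     modified_files = sorted(
--         p for p in baseline_paths & current_paths
--         if baseline[p] != current[p]
--     )
--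
--     return new_files, removed_files, modified_files
-- ===== SOURCE B (Python) =====
-- def _check_changes(baseline: dict[str, str], current: dict[str, str]) -> tuple[list, list, list]:
--     """Compare current scan against baseline by sorting both item lists by key
--     and doing a single two-pointer merge scan; outputs come out already sorted."""
--     b = sorted(baseline.items(), key=lambda kv: kv[0])
--     c = sorted(current.items(), key=lambda kv: kv[0])
--     new_files, removed_files, modified_files = [], [], []
--     i = j = 0
--     while i < len(b) and j < len(c):
--         bk, bv = b[i]
--         ck, cv = c[j]
--         if bk == ck:
--             if bv != cv:
--                 modified_files.append(bk)
--             i += 1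
--             j += 1
--         elif bk < ck:
--             removed_files.append(bk)
--             i += 1
--         else:
--             new_files.append(ck)
--             j += 1
--     removed_files.extend(k for k, _ in b[i:])
--     new_files.extend(k for k, _ in c[j:])
--     return new_files, removed_files, modified_files
-- ===== Notes on version B (the rewrite author's own statement) =====
-- stated objective: alternative
-- what changed: Replaces set algebra plus three final sorts by sorting both item lists by key once and classifying in a single two-pointer merge scan whose three output lists emerge already sorted.
import Mathlib
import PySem

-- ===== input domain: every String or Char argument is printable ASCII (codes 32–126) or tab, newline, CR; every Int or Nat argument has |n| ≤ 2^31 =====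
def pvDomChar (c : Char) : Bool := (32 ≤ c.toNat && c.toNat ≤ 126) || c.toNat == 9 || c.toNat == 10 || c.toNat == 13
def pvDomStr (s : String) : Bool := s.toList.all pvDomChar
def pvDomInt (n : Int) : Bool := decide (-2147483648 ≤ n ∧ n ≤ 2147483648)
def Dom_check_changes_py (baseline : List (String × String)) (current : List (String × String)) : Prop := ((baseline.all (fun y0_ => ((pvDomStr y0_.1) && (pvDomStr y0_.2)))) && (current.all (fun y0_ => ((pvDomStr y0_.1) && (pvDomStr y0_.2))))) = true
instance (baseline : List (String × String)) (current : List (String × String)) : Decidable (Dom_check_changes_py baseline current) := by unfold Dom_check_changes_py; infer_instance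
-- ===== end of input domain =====

-- B replaces A's set algebra (two set differences and an intersection generator, each sorted at the
-- end) by sorting both item lists by key once and classifying with a single two-pointer merge scan.


-- dict indexing d[k]: value of the first matching key (exact for Python dicts: under Pre_ keys are distinct); none = KeyError
def pyGetItem (d : List (String × String)) (k : String) : Option String :=
  match d with
  | [] => none
  | (k', v) :: rest => if k' == k then some v else pyGetItem rest k

-- ===== PORT A =====
def check_changes_py (baseline : List (String × String)) (current : List (String × String)) : List String × List String × List String :=
  let baseline_paths : PySem.Set String := PySem.Set.ofList (baseline.map Prod.fst)
  let current_paths : PySem.Set String := PySem.Set.ofList (current.map Prod.fst)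
  let new_files := PySem.List.sorted (PySem.Set.diff current_paths baseline_paths) (fun x => x)
  let removed_files := PySem.List.sorted (PySem.Set.diff baseline_paths current_paths) (fun x => x)
  let modified_files := PySem.List.sorted
    ((PySem.Set.inter baseline_paths current_paths).filter
      (fun p => pyGetItem baseline p != pyGetItem current p)) (fun x => x)
  (new_files, removed_files, modified_files)

-- ===== PORT B =====
-- the while loop of Source B: advancing i (resp. j) = recursing on the tail of b (resp. c);
-- the two trailing '.extend' calls are the fall-through case when one side is exhausted
def mergeLoop (bs cs : List (String × String)) (nf rf mf : List String) :
    List String × List String × List String :=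
  match bs, cs with
  | (bk, bv) :: bs', (ck, cv) :: cs' =>
    if bk == ck then
      mergeLoop bs' cs' nf rf (if bv != cv then mf ++ [bk] else mf)
    else if bk < ck then
      mergeLoop bs' ((ck, cv) :: cs') nf (rf ++ [bk]) mf
    else
      mergeLoop ((bk, bv) :: bs') cs' (nf ++ [ck]) rf mf
  | bs, cs => (nf ++ cs.map Prod.fst, rf ++ bs.map Prod.fst, mf)

def check_changes_py_alt (baseline : List (String × String)) (current : List (String × String)) : List String × List String × List String :=
  let b := PySem.List.sorted baseline (fun kv => kv.1)
  let c := PySem.List.sorted current (fun kv => kv.1)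
  mergeLoop b c [] [] []

-- ===== PRECONDITION & SPEC =====
-- Pre_ requires distinct keys within each association list: a Python dict cannot hold duplicate
-- keys, so this excludes no input the Python A accepts (only assoc lists that represent no dict).
def Pre_check_changes_py (baseline : List (String × String)) (current : List (String × String)) : Prop :=
  (baseline.map Prod.fst).Nodup ∧ (current.map Prod.fst).Nodup
instance (baseline : List (String × String)) (current : List (String × String)) : Decidable (Pre_check_changes_py baseline current) := by unfold Pre_check_changes_py; infer_instance
def pvWitness_check_changes_py : (List (String × String)) × (List (String × String)) :=
  ([("a", "1"), ("b", "2")], [("b", "9"), ("c", "3")])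

def Spec_check_changes_py (baseline : List (String × String)) (current : List (String × String)) (out : List String × List String × List String) : Prop := out = check_changes_py_alt baseline current
instance (baseline : List (String × String)) (current : List (String × String)) (out : List String × List String × List String) : Decidable (Spec_check_changes_py baseline current out) := by unfold Spec_check_changes_py; infer_instance

-- ===== CLAIM (what is proved, stated in full; the proofs are below) =====
def Claim_equal_check_changes_py : Prop := ∀ (baseline : List (String × String)) (current : List (String × String)), Dom_check_changes_py baseline current → Pre_check_changes_py baseline current → Spec_check_changes_py baseline current (check_changes_py baseline current)

-- ===== LEMMAS AND PROOFS =====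

lemma ofList_eq_self : ∀ (l acc : List String), (acc ++ l).Nodup →
    List.foldl PySem.Set.add acc l = acc ++ l := by
  intro l
  induction l with
  | nil => simp
  | cons x t ih =>
    intro acc h
    have hx : x ∉ acc := fun hm => (List.disjoint_of_nodup_append h) hm (by simp)
    have hc : acc.contains x = false := by
      simp [List.contains_eq_mem, hx]
    have h' : ((acc ++ [x]) ++ t).Nodup := by
      rw [List.append_assoc]; simpa using h
    simp only [List.foldl_cons, PySem.Set.add, PySem.Set.contains, hc]
    simp only [Bool.false_eq_true, if_false]
    rw [ih (acc ++ [x]) h']; simp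

lemma mem_pyGetItem : ∀ (l : List (String × String)) (k v : String),
    (l.map Prod.fst).Nodup → (k, v) ∈ l → pyGetItem l k = some v := by
  intro l
  induction l with
  | nil => simp
  | cons p t ih =>
    intro k v hn hm
    obtain ⟨k', v'⟩ := p
    simp only [List.map_cons, List.nodup_cons] at hn
    rcases List.mem_cons.mp hm with h | h
    · rw [Prod.mk.injEq] at h
      simp [pyGetItem, h.1.symm, h.2]
    · have hk : k' ≠ k := by
        rintro rfl
        exact hn.1 (List.mem_map.mpr ⟨_, h, rfl⟩)
      simp only [pyGetItem, beq_iff_eq, hk, ite_false]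
      exact ih k v hn.2 h

-- cons/contains/pyGetItem reductions used throughout
lemma contains_cons_ne (a k : String) (l : List String) (h : k ≠ a) :
    (a :: l).contains k = l.contains k := by
  simp [h]

lemma pyGetItem_cons_ne (a v k : String) (l : List (String × String)) (h : a ≠ k) :
    pyGetItem ((a, v) :: l) k = pyGetItem l k := by
  simp [pyGetItem, h]

lemma head_lt_of_pairwise {k : String} {l : List (String × String)}
    (h : (k :: l.map Prod.fst).Pairwise (· < ·)) : ∀ kv ∈ l, k < kv.1 := by
  intro kv hm
  exact (List.pairwise_cons.mp h).1 kv.1 (List.mem_map.mpr ⟨kv, hm, rfl⟩)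

lemma pyGetItem_eq_none : ∀ (l : List (String × String)) (k : String),
    k ∉ l.map Prod.fst → pyGetItem l k = none := by
  intro l
  induction l with
  | nil => intro k _; rfl
  | cons p t ih =>
    intro k hk
    obtain ⟨k', v⟩ := p
    simp only [List.map_cons, List.mem_cons, not_or] at hk
    rw [pyGetItem_cons_ne _ _ _ _ (fun h => hk.1 h.symm)]
    exact ih k hk.2

lemma pyGetItem_perm (l₁ l₂ : List (String × String)) (h : l₁.Perm l₂)
    (hn : (l₁.map Prod.fst).Nodup) (k : String) : pyGetItem l₁ k = pyGetItem l₂ k := by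
  by_cases hk : k ∈ l₁.map Prod.fst
  · obtain ⟨⟨k', v⟩, hm, hf⟩ := List.mem_map.mp hk
    rcases hf with rfl
    rw [mem_pyGetItem l₁ _ v hn hm,
      mem_pyGetItem l₂ _ v ((h.map Prod.fst).nodup_iff.mp hn) (h.mem_iff.mp hm)]
  · rw [pyGetItem_eq_none l₁ k hk,
      pyGetItem_eq_none l₂ k (fun hm => hk ((h.map Prod.fst).mem_iff.mpr hm))]

lemma not_contains_of_lt_all (l : List (String × String)) (k : String)
    (h : ∀ kv ∈ l, k < kv.1) : (l.map Prod.fst).contains k = false := by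
  simp only [List.contains_eq_mem, decide_eq_false_iff_not, List.mem_map]
  rintro ⟨kv, hm, rfl⟩
  exact lt_irrefl _ (h kv hm)

lemma map_fst_filter_key (l : List (String × String)) (p : String → Bool) :
    (l.map Prod.fst).filter p = (l.filter (fun kv => p kv.1)).map Prod.fst := by
  rw [List.filter_map]; rfl


-- characterisation of the merge scan on key-strictly-sorted inputs
lemma merge_spec : ∀ (n : Nat) (bs cs : List (String × String)) (nf rf mf : List String),
    bs.length + cs.length ≤ n →
    (bs.map Prod.fst).Pairwise (· < ·) → (cs.map Prod.fst).Pairwise (· < ·) →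
    mergeLoop bs cs nf rf mf =
      (nf ++ (cs.filter (fun kv => !((bs.map Prod.fst).contains kv.1))).map Prod.fst,
       rf ++ (bs.filter (fun kv => !((cs.map Prod.fst).contains kv.1))).map Prod.fst,
       mf ++ (bs.filter (fun kv =>
         ((cs.map Prod.fst).contains kv.1) && (pyGetItem cs kv.1 != some kv.2))).map Prod.fst) := by
  intro n
  induction n with
  | zero =>
    rintro (_ | ⟨⟨bk, bv⟩, bs'⟩) (_ | ⟨⟨ck, cv⟩, cs'⟩) nf rf mf hlen hb hc <;>
      simp_all [mergeLoop]
  | succ n ih =>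
    rintro (_ | ⟨⟨bk, bv⟩, bs'⟩) (_ | ⟨⟨ck, cv⟩, cs'⟩) nf rf mf hlen hb hc
    · simp [mergeLoop]
    · simp [mergeLoop]
    · simp [mergeLoop]
    · have hbtail : ∀ kv ∈ bs', bk < kv.1 := head_lt_of_pairwise hb
      have hctail : ∀ kv ∈ cs', ck < kv.1 := head_lt_of_pairwise hc
      have hb' := (List.pairwise_cons.mp hb).2
      have hc' := (List.pairwise_cons.mp hc).2
      by_cases heq : bk = ck
      · subst heq
        have hL : bs'.length + cs'.length ≤ n := by simp at hlen; omega
        rw [show mergeLoop ((bk, bv) :: bs') ((bk, cv) :: cs') nf rf mf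
            = mergeLoop bs' cs' nf rf (if bv != cv then mf ++ [bk] else mf) by
          simp [mergeLoop]]
        rw [ih bs' cs' nf rf _ hL hb' hc']
        simp only [List.map_cons, List.filter_cons, List.contains_cons, beq_self_eq_true,
          Bool.true_or, Bool.not_true, Bool.false_eq_true, if_false]
        refine Prod.ext ?_ (Prod.ext ?_ ?_)
        · refine congrArg (fun l => nf ++ List.map Prod.fst l) (List.filter_congr ?_).symm
          intro kv hm
          have hne : (kv.1 == bk) = false := by
            simp [ne_of_gt (hctail kv hm)]
          rw [hne, Bool.false_or]
        · refine congrArg (fun l => rf ++ List.map Prod.fst l) (List.filter_congr ?_).symm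
          intro kv hm
          have hne : (kv.1 == bk) = false := by
            simp [ne_of_gt (hbtail kv hm)]
          rw [hne, Bool.false_or]
        · have hg : pyGetItem ((bk, cv) :: cs') bk = some cv := by
            simp [pyGetItem]
          have htail : List.filter (fun kv =>
                (kv.1 == bk || (cs'.map Prod.fst).contains kv.1) &&
                  (pyGetItem ((bk, cv) :: cs') kv.1 != some kv.2)) bs'
              = List.filter (fun kv =>
                  ((cs'.map Prod.fst).contains kv.1) && (pyGetItem cs' kv.1 != some kv.2)) bs' := by
            apply List.filter_congr
            intro kv hm
            have hne : (kv.1 == bk) = false := by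
              simp [ne_of_gt (hbtail kv hm)]
            rw [hne, Bool.false_or, pyGetItem_cons_ne _ _ _ _ (ne_of_lt (hbtail kv hm))]
          simp only [hg, Bool.true_and, htail]
          by_cases hv : bv = cv
          · subst hv
            simp
          · have h4 : (bv != cv) = true := by simp [hv]
            have h5 : (some cv != some bv) = true := by simp [Ne.symm hv]
            simp [h4, h5]
      · by_cases hlt : bk < ck
        · have hcs : ∀ kv ∈ (ck, cv) :: cs', bk < kv.1 := by
            intro kv hm
            rcases List.mem_cons.mp hm with rfl | hm'
            · exact hlt
            · exact lt_trans hlt (hctail kv hm')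
          have hL : bs'.length + ((ck, cv) :: cs').length ≤ n := by
            simp at hlen ⊢; omega
          rw [show mergeLoop ((bk, bv) :: bs') ((ck, cv) :: cs') nf rf mf
              = mergeLoop bs' ((ck, cv) :: cs') nf (rf ++ [bk]) mf by
            simp [mergeLoop, heq, hlt]]
          rw [ih bs' ((ck, cv) :: cs') nf (rf ++ [bk]) mf hL hb' hc]
          have h1 : ((((ck, cv) :: cs').map Prod.fst).contains bk) = false :=
            not_contains_of_lt_all _ _ hcs
          refine Prod.ext ?_ (Prod.ext ?_ ?_)
          · refine congrArg (fun l => nf ++ List.map Prod.fst l) (List.filter_congr ?_).symm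
            intro kv hm
            rw [List.map_cons, contains_cons_ne _ _ _ (ne_of_gt (hcs kv hm))]
          · rw [show List.filter (fun kv => !((List.map Prod.fst ((ck, cv) :: cs')).contains kv.1)) ((bk, bv) :: bs')
                = (bk, bv) :: List.filter (fun kv => !((List.map Prod.fst ((ck, cv) :: cs')).contains kv.1)) bs' by
              rw [List.filter_cons,
                if_pos (show (!((List.map Prod.fst ((ck, cv) :: cs')).contains bk)) = true by rw [h1]; rfl)]]
            simp
          · rw [show List.filter (fun kv =>
                  ((List.map Prod.fst ((ck, cv) :: cs')).contains kv.1) &&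
                    (pyGetItem ((ck, cv) :: cs') kv.1 != some kv.2)) ((bk, bv) :: bs')
                = List.filter (fun kv =>
                    ((List.map Prod.fst ((ck, cv) :: cs')).contains kv.1) &&
                      (pyGetItem ((ck, cv) :: cs') kv.1 != some kv.2)) bs' by
              rw [List.filter_cons,
                if_neg (show ¬((((List.map Prod.fst ((ck, cv) :: cs')).contains bk) &&
                  (pyGetItem ((ck, cv) :: cs') bk != some bv)) = true) by rw [h1]; simp)]]
        · have hgt : ck < bk := by
            rcases lt_trichotomy bk ck with h | h | h
            · exact absurd h hlt
            · exact absurd h heq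
            · exact h
          have hbs : ∀ kv ∈ (bk, bv) :: bs', ck < kv.1 := by
            intro kv hm
            rcases List.mem_cons.mp hm with rfl | hm'
            · exact hgt
            · exact lt_trans hgt (hbtail kv hm')
          have hL : ((bk, bv) :: bs').length + cs'.length ≤ n := by
            simp at hlen ⊢; omega
          rw [show mergeLoop ((bk, bv) :: bs') ((ck, cv) :: cs') nf rf mf
              = mergeLoop ((bk, bv) :: bs') cs' (nf ++ [ck]) rf mf by
            simp [mergeLoop, heq, hlt]]
          rw [ih ((bk, bv) :: bs') cs' (nf ++ [ck]) rf mf hL hb hc']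
          have h1 : ((((bk, bv) :: bs').map Prod.fst).contains ck) = false :=
            not_contains_of_lt_all _ _ hbs
          refine Prod.ext ?_ (Prod.ext ?_ ?_)
          · rw [show List.filter (fun kv => !((List.map Prod.fst ((bk, bv) :: bs')).contains kv.1)) ((ck, cv) :: cs')
                = (ck, cv) :: List.filter (fun kv => !((List.map Prod.fst ((bk, bv) :: bs')).contains kv.1)) cs' by
              rw [List.filter_cons,
                if_pos (show (!((List.map Prod.fst ((bk, bv) :: bs')).contains ck)) = true by rw [h1]; rfl)]]
            simp
          · refine congrArg (fun l => rf ++ List.map Prod.fst l) (List.filter_congr ?_).symm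
            intro kv hm
            rw [List.map_cons, contains_cons_ne _ _ _ (ne_of_gt (hbs kv hm))]
          · refine congrArg (fun l => mf ++ List.map Prod.fst l) (List.filter_congr ?_).symm
            intro kv hm
            rw [List.map_cons, contains_cons_ne _ _ _ (ne_of_gt (hbs kv hm)),
              pyGetItem_cons_ne _ _ _ _ (ne_of_lt (hbs kv hm))]

theorem main_eq (b c : List (String × String))
    (hb : (b.map Prod.fst).Nodup) (hc : (c.map Prod.fst).Nodup) :
    check_changes_py b c = check_changes_py_alt b c := by
  have hpb : (PySem.List.sorted b (fun kv => kv.1)).Perm b := PySem.List.sorted_perm _ _ _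
  have hpc : (PySem.List.sorted c (fun kv => kv.1)).Perm c := PySem.List.sorted_perm _ _ _
  have hbnodup : ((PySem.List.sorted b (fun kv => kv.1)).map Prod.fst).Nodup :=
    ((hpb.map Prod.fst).nodup_iff).mpr hb
  have hcnodup : ((PySem.List.sorted c (fun kv => kv.1)).map Prod.fst).Nodup :=
    ((hpc.map Prod.fst).nodup_iff).mpr hc
  have hble : ((PySem.List.sorted b (fun kv => kv.1)).map Prod.fst).Pairwise (· ≤ ·) :=
    PySem.List.sorted_map_key_pairwise b (fun kv => kv.1)
  have hcle : ((PySem.List.sorted c (fun kv => kv.1)).map Prod.fst).Pairwise (· ≤ ·) :=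
    PySem.List.sorted_map_key_pairwise c (fun kv => kv.1)
  have hblt : ((PySem.List.sorted b (fun kv => kv.1)).map Prod.fst).Pairwise (· < ·) :=
    (hble.and hbnodup).imp (fun h => lt_of_le_of_ne h.1 h.2)
  have hclt : ((PySem.List.sorted c (fun kv => kv.1)).map Prod.fst).Pairwise (· < ·) :=
    (hcle.and hcnodup).imp (fun h => lt_of_le_of_ne h.1 h.2)
  have hob : PySem.Set.ofList (b.map Prod.fst) = b.map Prod.fst := by
    simpa [PySem.Set.ofList, PySem.Set.empty] using ofList_eq_self (b.map Prod.fst) [] (by simpa using hb)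
  have hoc : PySem.Set.ofList (c.map Prod.fst) = c.map Prod.fst := by
    simpa [PySem.Set.ofList, PySem.Set.empty] using ofList_eq_self (c.map Prod.fst) [] (by simpa using hc)
  have hcontb : ∀ x, ((PySem.List.sorted b (fun kv => kv.1)).map Prod.fst).contains x
      = (b.map Prod.fst).contains x := fun x => by
    simp [List.contains_eq_mem, (hpb.map Prod.fst).mem_iff]
  have hcontc : ∀ x, ((PySem.List.sorted c (fun kv => kv.1)).map Prod.fst).contains x
      = (c.map Prod.fst).contains x := fun x => by
    simp [List.contains_eq_mem, (hpc.map Prod.fst).mem_iff]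
  simp only [check_changes_py, check_changes_py_alt]
  rw [merge_spec ((PySem.List.sorted b (fun kv => kv.1)).length
        + (PySem.List.sorted c (fun kv => kv.1)).length)
      _ _ [] [] [] le_rfl hblt hclt]
  simp only [List.nil_append, hob, hoc, PySem.Set.diff, PySem.Set.inter, PySem.Set.contains]
  refine Prod.ext ?_ (Prod.ext ?_ ?_) <;> dsimp only
  · -- new files
    apply PySem.List.sorted_eq_of_perm_of_pairwise_lt
    · rw [← map_fst_filter_key (PySem.List.sorted c (fun kv => kv.1))
        (fun x => !(((PySem.List.sorted b (fun kv => kv.1)).map Prod.fst).contains x))]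
      exact ((hpc.map Prod.fst).filter _).trans
        (List.Perm.of_eq (List.filter_congr (fun x _ => by rw [hcontb x])))
    · rw [← map_fst_filter_key (PySem.List.sorted c (fun kv => kv.1))
        (fun x => !(((PySem.List.sorted b (fun kv => kv.1)).map Prod.fst).contains x))]
      exact List.Pairwise.sublist List.filter_sublist hclt
  · -- removed files
    apply PySem.List.sorted_eq_of_perm_of_pairwise_lt
    · rw [← map_fst_filter_key (PySem.List.sorted b (fun kv => kv.1))
        (fun x => !(((PySem.List.sorted c (fun kv => kv.1)).map Prod.fst).contains x))]
      exact ((hpb.map Prod.fst).filter _).trans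
        (List.Perm.of_eq (List.filter_congr (fun x _ => by rw [hcontc x])))
    · rw [← map_fst_filter_key (PySem.List.sorted b (fun kv => kv.1))
        (fun x => !(((PySem.List.sorted c (fun kv => kv.1)).map Prod.fst).contains x))]
      exact List.Pairwise.sublist List.filter_sublist hblt
  · -- modified files
    have hpred : List.filter (fun kv =>
          (((PySem.List.sorted c (fun kv => kv.1)).map Prod.fst).contains kv.1) &&
            (pyGetItem (PySem.List.sorted c (fun kv => kv.1)) kv.1 != some kv.2))
          (PySem.List.sorted b (fun kv => kv.1))
        = List.filter (fun kv =>
            ((c.map Prod.fst).contains kv.1) && (pyGetItem b kv.1 != pyGetItem c kv.1))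
            (PySem.List.sorted b (fun kv => kv.1)) := by
      apply List.filter_congr
      intro kv hm
      have h1 : pyGetItem (PySem.List.sorted c (fun kv => kv.1)) kv.1 = pyGetItem c kv.1 :=
        pyGetItem_perm _ _ hpc hcnodup kv.1
      have h2 : pyGetItem b kv.1 = some kv.2 := by
        obtain ⟨k, v⟩ := kv
        exact mem_pyGetItem b k v hb (hpb.subset hm)
      rw [hcontc, h1, h2]
      congr 1
      rw [Bool.eq_iff_iff]
      simp only [bne_iff_ne]
      exact ne_comm
    rw [hpred]
    apply PySem.List.sorted_eq_of_perm_of_pairwise_lt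
    · rw [← map_fst_filter_key (PySem.List.sorted b (fun kv => kv.1))
        (fun x => ((c.map Prod.fst).contains x) && (pyGetItem b x != pyGetItem c x))]
      refine ((hpb.map Prod.fst).filter _).trans (List.Perm.of_eq ?_)
      rw [List.filter_filter]
      exact List.filter_congr (fun x _ => Bool.and_comm _ _)
    · rw [← map_fst_filter_key (PySem.List.sorted b (fun kv => kv.1))
        (fun x => ((c.map Prod.fst).contains x) && (pyGetItem b x != pyGetItem c x))]
      exact List.Pairwise.sublist List.filter_sublist hblt

-- ===== VERDICT (by name: the statement is the Claim_ definition above) =====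
theorem check_changes_py_spec : Claim_equal_check_changes_py := by
  intro baseline current _ hpre
  unfold Spec_check_changes_py
  exact main_eq baseline current hpre.1 hpre.2
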